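-- pv_equiv track=rewrite | github.com/marcus-deans/duke-computationalmethods | apt/apt3/CarrotBoxes.py | theIndex
-- ===== SOURCE A (Python) =====
-- def theIndex(carrots, amount):
--     for x in range(0,amount):
--         for y in range(100,-1,-1):
--             try:
--                 foun = carrots.index(y)
--             except:
--                 continue
--             else:
--                 carrots[foun] -= 1
--                 break
--     return foun
-- ===== SOURCE B (Python) =====
-- def theIndex(carrots, amount):
--     # pop order is predetermined: element i (value v in [0,100]) is picked once per
--     # level v, v-1, ..., 0, in (level descending, index ascending) order
--     order = [i for L in range(100, -1, -1) for i, v in enumerate(carrots) if L <= v <= 100]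
--     k = min(amount, len(order))
--     return order[k - 1]
-- ===== Notes on version B (the rewrite author's own statement) =====
-- stated objective: faster
-- what changed: Instead of simulating amount rounds of scan-for-max-and-decrement, B precomputes the entire deterministic pop order in one pass over the 101 levels (element i with value v in [0,100] is popped once per level v..0, in level-descending then index-ascending order) and directly indexes the min(amount, total)-th entry.
import Mathlib
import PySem

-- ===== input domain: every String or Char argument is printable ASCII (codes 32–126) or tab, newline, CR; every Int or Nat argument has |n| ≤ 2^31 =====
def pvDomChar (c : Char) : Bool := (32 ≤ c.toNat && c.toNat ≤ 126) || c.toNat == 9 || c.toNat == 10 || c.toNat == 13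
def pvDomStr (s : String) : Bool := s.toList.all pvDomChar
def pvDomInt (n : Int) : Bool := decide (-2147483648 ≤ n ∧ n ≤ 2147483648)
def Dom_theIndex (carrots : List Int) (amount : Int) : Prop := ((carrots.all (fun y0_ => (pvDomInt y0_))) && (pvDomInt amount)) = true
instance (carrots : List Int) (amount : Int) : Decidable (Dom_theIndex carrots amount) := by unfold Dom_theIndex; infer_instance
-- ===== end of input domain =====

-- B precomputes the whole pop order in one pass over the 101 levels instead of
-- simulating `amount` scan-and-decrement rounds (measured faster in a timing run).
-- A mutates `carrots` in place; B does not — the equivalence proved here is about the return value only.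

-- ===== PORT A =====
-- inner 'for y in range(100,-1,-1): try foun = carrots.index(y) ... break'
def findScanA (carrots : List Int) : List Int → Option Nat
  | [] => none
  | y :: ys =>
    match PySem.List.index? carrots y with
    | some foun => some foun
    | none => findScanA carrots ys

-- one iteration of the outer 'for x in range(0,amount)' loop; state = (carrots, foun)
def stepA (st : List Int × Option Nat) : List Int × Option Nat :=
  match findScanA st.1 (PySem.List.pyRange 100 (-1) (-1)) with
  | none => st
  | some foun =>
      (PySem.List.pySetD st.1 (foun : Int) (PySem.List.pyGetD st.1 (foun : Int) 0 - 1), some foun)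

def theIndex (carrots : List Int) (amount : Int) : Int :=
  match ((PySem.List.pyRange 0 amount 1).foldl (fun st _ => stepA st) (carrots, none)).2 with
  | some foun => (foun : Int)
  | none => 0   -- Python raises NameError here (foun never bound); excluded by Pre_theIndex

-- ===== PORT B =====
def theIndex_alt (carrots : List Int) (amount : Int) : Int :=
  let order : List Int :=
    (PySem.List.pyRange 100 (-1) (-1)).flatMap (fun L =>
      (PySem.List.enumerate carrots).filterMap (fun p =>
        if L ≤ p.2 ∧ p.2 ≤ 100 then some p.1 else none))
  let k := min amount (order.length : Int)
  (PySem.List.pyGet? order (k - 1)).getD 0   -- none = IndexError (order = []); excluded by Pre_theIndex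

-- ===== PRECONDITION & SPEC =====
-- A raises NameError (foun is never bound) iff amount < 1 or no element lies in [0,100]; Pre_ excludes exactly those inputs.
def Pre_theIndex (carrots : List Int) (amount : Int) : Prop :=
  1 ≤ amount ∧ ∃ v ∈ carrots, 0 ≤ v ∧ v ≤ 100
instance (carrots : List Int) (amount : Int) : Decidable (Pre_theIndex carrots amount) := by
  unfold Pre_theIndex; infer_instance

def pvWitness_theIndex : List Int × Int := ([5, -3, 200, 5], 7)

def Spec_theIndex (carrots : List Int) (amount : Int) (out : Int) : Prop := out = theIndex_alt carrots amount
instance (carrots : List Int) (amount : Int) (out : Int) : Decidable (Spec_theIndex carrots amount out) := by unfold Spec_theIndex; infer_instance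

-- ===== CLAIM (what is proved, stated in full; the proofs are below) =====
def Claim_equal_theIndex : Prop := ∀ (carrots : List Int) (amount : Int), Dom_theIndex carrots amount → Pre_theIndex carrots amount → Spec_theIndex carrots amount (theIndex carrots amount)

-- ===== LEMMAS AND PROOFS =====

-- the level list [100, 99, ..., 0] in a shape suited to induction
def levs : Nat → List Int
  | 0 => []
  | n + 1 => ((n : Int)) :: levs n

-- tokens of one level, with enumeration starting at s: (L, i) for each index i whose value qualifies at level L
def lvlF (cs : List Int) (L s : Int) : List (Int × Int) :=
  (PySem.List.enumerate cs s).filterMap (fun p => if L ≤ p.2 ∧ p.2 ≤ 100 then some (L, p.1) else none)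

def lvl (cs : List Int) (L : Int) : List (Int × Int) := lvlF cs L 0

def tok (ls : List Int) (cs : List Int) : List (Int × Int) := ls.flatMap (fun L => lvl cs L)

theorem levs_pyRange : PySem.List.pyRange 100 (-1) (-1) = levs 101 := by decide

theorem mem_levs {L : Int} {n : Nat} : L ∈ levs n ↔ 0 ≤ L ∧ L < n := by
  induction n with
  | zero => simp [levs]
  | succ k ih => simp [levs, ih]; omega

theorem lvlF_nil_iff {cs : List Int} {L : Int} : ∀ {s : Int},
    (lvlF cs L s = [] ↔ ∀ v ∈ cs, ¬ (L ≤ v ∧ v ≤ 100)) := by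
  induction cs with
  | nil => intro s; simp [lvlF, PySem.List.enumerate_nil]
  | cons x xs ih =>
    intro s
    by_cases h : L ≤ x ∧ x ≤ 100
    · simp [lvlF, PySem.List.enumerate_cons, List.filterMap_cons, h]
    · simp only [lvlF, PySem.List.enumerate_cons, List.filterMap_cons, if_neg h] at ih ⊢
      rw [@ih (s + 1)]
      constructor
      · intro hall v hv
        rcases List.mem_cons.1 hv with rfl | hv'
        · exact h
        · exact hall v hv'
      · intro hall v hv
        exact hall v (List.mem_cons_of_mem x hv)

theorem lvlF_fst {cs : List Int} {L s : Int} {q : Int × Int} (hq : q ∈ lvlF cs L s) : q.1 = L := by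
  obtain ⟨p, _, hp⟩ := List.mem_filterMap.1 hq
  by_cases h : L ≤ p.2 ∧ p.2 ≤ 100 <;> simp [h] at hp
  simp [← hp]

theorem tok_fst {ls cs : List Int} {q : Int × Int} (hq : q ∈ tok ls cs) : q.1 ∈ ls := by
  obtain ⟨L, hL, hq'⟩ := List.mem_flatMap.1 hq
  rwa [lvlF_fst hq']

theorem lvlF_cons_inv : ∀ {cs : List Int} {L s : Int} {p : Int × Int} {t : List (Int × Int)},
    lvlF cs L s = p :: t →
    ∃ j : Nat, j < cs.length ∧ p = (L, s + (j : Int)) ∧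
      (L ≤ cs.getD j 0 ∧ cs.getD j 0 ≤ 100) ∧
      (∀ j' : Nat, j' < j → ¬ (L ≤ cs.getD j' 0 ∧ cs.getD j' 0 ≤ 100)) ∧
      lvlF (cs.set j (L - 1)) L s = t := by
  intro cs
  induction cs with
  | nil => intro L s p t h; simp [lvlF, PySem.List.enumerate_nil] at h
  | cons x xs ih =>
    intro L s p t h
    by_cases hx : L ≤ x ∧ x ≤ 100
    · simp only [lvlF, PySem.List.enumerate_cons, List.filterMap_cons, hx, if_pos] at h
      obtain ⟨hp, ht⟩ := List.cons.injEq .. ▸ h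
      refine ⟨0, by simp, by simp [← hp], by simpa using hx, by omega, ?_⟩
      have hL : ¬ (L ≤ L - 1 ∧ L - 1 ≤ 100) := by omega
      simp only [List.set_cons_zero, lvlF, PySem.List.enumerate_cons, List.filterMap_cons, hL,
        if_neg, if_false]
      exact ht
    · simp only [lvlF, PySem.List.enumerate_cons, List.filterMap_cons, hx, if_neg, if_false] at h
      obtain ⟨j, hj, hp, hq, hearly, hset⟩ := ih h
      refine ⟨j + 1, by simpa using hj, by rw [hp]; congr 1; push_cast; ring, by simpa using hq,
        ?_, ?_⟩
      · intro j' hj'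
        cases j' with
        | zero => simpa using hx
        | succ k => intro hk; exact hearly k (by omega) (by simpa using hk)
      · simp only [List.set_cons_succ, lvlF, PySem.List.enumerate_cons, List.filterMap_cons, hx,
          if_neg, if_false]
        exact hset

theorem lvlF_set_eq : ∀ {cs : List Int} {j : Nat} {x L s : Int}, j < cs.length →
    ((L ≤ cs.getD j 0 ∧ cs.getD j 0 ≤ 100) ↔ (L ≤ x ∧ x ≤ 100)) →
    lvlF (cs.set j x) L s = lvlF cs L s := by
  intro cs
  induction cs with
  | nil => intro j x L s hj _; simp at hj
  | cons y ys ih =>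
    intro j x L s hj hiff
    cases j with
    | zero =>
      simp only [List.getD_cons_zero] at hiff
      simp only [List.set_cons_zero, lvlF, PySem.List.enumerate_cons, List.filterMap_cons]
      by_cases h : L ≤ y ∧ y ≤ 100
      · rw [if_pos (hiff.1 h), if_pos h]
      · rw [if_neg (fun hx => h (hiff.2 hx)), if_neg h]
    | succ k =>
      simp only [List.getD_cons_succ] at hiff
      simp only [List.set_cons_succ, lvlF, PySem.List.enumerate_cons, List.filterMap_cons]
      have := @ih k x L (s + 1) (by simpa using hj) hiff
      simp only [lvlF] at this
      rw [this]

theorem tok_congr {ls : List Int} {cs cs' : List Int}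
    (h : ∀ L ∈ ls, lvl cs' L = lvl cs L) : tok ls cs' = tok ls cs := by
  induction ls with
  | nil => rfl
  | cons L ls ih =>
    simp only [tok, List.flatMap_cons] at ih ⊢
    rw [h L (by simp), ih (fun L' hL' => h L' (by simp [hL']))]

theorem getD_mem {cs : List Int} {j : Nat} (hj : j < cs.length) : cs.getD j 0 ∈ cs := by
  rw [List.getD_eq_getElem cs 0 hj]; exact List.getElem_mem hj

theorem tok_none : ∀ (n : Nat) (cs : List Int), n ≤ 101 → tok (levs n) cs = [] →
    findScanA cs (levs n) = none := by
  intro n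
  induction n with
  | zero => intro cs _ _; rfl
  | succ k ih =>
    intro cs hn htok
    rw [show levs (k+1) = ((k:Int)) :: levs k from rfl] at htok
    simp only [tok, List.flatMap_cons, List.append_eq_nil_iff] at htok
    obtain ⟨h1, h2⟩ := htok
    have hno : ∀ v ∈ cs, ¬ ((k : Int) ≤ v ∧ v ≤ 100) := lvlF_nil_iff.1 h1
    have hidx : PySem.List.index? cs (k : Int) = none := by
      rw [PySem.List.index?_eq_none_iff]
      intro hmem
      exact hno _ hmem ⟨le_refl _, by exact_mod_cast Nat.le_of_succ_le_succ hn⟩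
    simp only [levs, findScanA, hidx]
    exact ih cs (by omega) h2

theorem tok_step : ∀ (n : Nat) (cs : List Int), n ≤ 101 →
    (∀ v ∈ cs, ¬ ((n : Int) ≤ v ∧ v ≤ 100)) →
    ∀ (p : Int × Int) (rest : List (Int × Int)), tok (levs n) cs = p :: rest →
    ∃ j : Nat, j < cs.length ∧ p = (cs.getD j 0, (j : Int)) ∧
      findScanA cs (levs n) = some j ∧
      tok (levs n) (cs.set j (cs.getD j 0 - 1)) = rest := by
  intro n
  induction n with
  | zero => intro cs _ _ p rest h; simp [tok, levs] at h
  | succ k ih =>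
    intro cs hn hno p rest heq
    simp only [levs, tok, List.flatMap_cons] at heq
    by_cases h0 : lvl cs (k : Int) = []
    · rw [h0, List.nil_append] at heq
      have hno' : ∀ v ∈ cs, ¬ ((k : Int) ≤ v ∧ v ≤ 100) := lvlF_nil_iff.1 h0
      obtain ⟨j, hj, hp, hfind, hset⟩ := ih cs (by omega) hno' p rest heq
      have hidx : PySem.List.index? cs (k : Int) = none := by
        rw [PySem.List.index?_eq_none_iff]
        intro hmem
        exact hno' _ hmem ⟨le_refl _, by exact_mod_cast Nat.le_of_succ_le_succ hn⟩
      refine ⟨j, hj, hp, ?_, ?_⟩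
      · simp only [levs, findScanA, hidx]; exact hfind
      · -- the decremented value has level < k, so level k stays empty
        have hvlt : cs.getD j 0 < (k : Int) := by
          have hpmem : p ∈ tok (levs k) cs := by
            simp only [tok]; rw [heq]; simp
          have := mem_levs.1 (tok_fst hpmem)
          rw [hp] at this
          exact_mod_cast this.2
        have h0' : lvl (cs.set j (cs.getD j 0 - 1)) (k : Int) = [] := by
          rw [show lvl (cs.set j (cs.getD j 0 - 1)) (k:Int) = lvlF (cs.set j (cs.getD j 0 - 1)) (k:Int) 0 from rfl, lvlF_nil_iff]
          intro w hw
          rcases List.mem_or_eq_of_mem_set hw with hw' | hw'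
          · exact hno' w hw'
          · subst hw'; omega
        simp only [levs, tok, List.flatMap_cons]
        rw [h0', List.nil_append]
        exact hset
    · obtain ⟨p₀, t, h0'⟩ := List.exists_cons_of_ne_nil h0
      rw [h0', List.cons_append] at heq
      obtain ⟨hp, hrest⟩ := List.cons.injEq .. ▸ heq
      obtain ⟨j, hj, hp₀, hq, hearly, hset⟩ := lvlF_cons_inv h0'
      -- the value at j equals exactly k
      have hvk : cs.getD j 0 = (k : Int) := by
        have := hno _ (getD_mem hj)
        push_cast at this hq ⊢
        omega
      have hk100 : (k : Int) ≤ 100 := by exact_mod_cast Nat.le_of_succ_le_succ hn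
      -- index? finds j: earlier entries cannot hold value k
      have hidx : PySem.List.index? cs (k : Int) = some j := by
        rw [PySem.List.index?_eq_some_iff]
        refine ⟨cs.take j, cs.drop (j + 1), ?_, by simp [List.length_take, Nat.min_eq_left (le_of_lt hj)], ?_⟩
        · conv_lhs => rw [← List.take_append_drop j cs]
          rw [List.drop_eq_getElem_cons hj]
          rw [← List.getD_eq_getElem cs 0 hj, hvk]
        · intro hmem
          obtain ⟨i, hi, hival⟩ := List.mem_iff_getElem.1 hmem
          have hij : i < j := by
            have := hi; simp [List.length_take] at this; omega
          have : cs.getD i 0 = (k : Int) := by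
            rw [List.getD_eq_getElem cs 0 (by omega)]
            rw [List.getElem_take] at hival
            exact hival
          exact hearly i hij (by rw [this]; exact ⟨le_refl _, hk100⟩)
      refine ⟨j, hj, ?_, ?_, ?_⟩
      · rw [← hp, hp₀, hvk]; simp
      · simp only [levs, findScanA, hidx]
      · -- new token list: level k loses its head, lower levels unchanged
        simp only [levs, tok, List.flatMap_cons]
        rw [hvk]
        have h1 : lvl (cs.set j ((k : Int) - 1)) (k : Int) = t := hset
        rw [h1]
        have h2 : tok (levs k) (cs.set j ((k : Int) - 1)) = tok (levs k) cs := by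
          apply tok_congr
          intro L hL
          obtain ⟨hL0, hLk⟩ := mem_levs.1 hL
          exact lvlF_set_eq hj (by rw [hvk]; constructor <;> intro _ <;> exact ⟨by omega, by omega⟩)
        simp only [tok] at h2
        rw [h2, ← hrest]

theorem take_getLast?_of_drop_cons {T : List (Int × Int)} {m : Nat} {p : Int × Int}
    {rest : List (Int × Int)} (h : T.drop m = p :: rest) :
    (T.take (m + 1)).getLast? = some p := by
  have hm : m < T.length := by
    by_contra hm
    rw [List.drop_eq_nil_of_le (by omega)] at h
    exact List.cons_ne_nil p rest h.symm
  have hTm : T[m]? = some p := by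
    have h2 : (T.drop m)[0]? = T[m + 0]? := List.getElem?_drop
    rw [h] at h2
    simpa using h2.symm
  rw [List.getLast?_eq_getElem?]
  have hlen : (T.take (m + 1)).length = m + 1 := by
    simp [List.length_take]; omega
  rw [hlen]
  simpa [List.getElem?_take, Nat.lt_succ_self] using hTm

theorem iterA_spec : ∀ (m : Nat) (cs : List Int),
    tok (levs 101) (stepA^[m] (cs, (none : Option Nat))).1 = (tok (levs 101) cs).drop m ∧
    (stepA^[m] (cs, (none : Option Nat))).2.map (fun j : Nat => (j : Int))
      = (((tok (levs 101) cs).take m).getLast?).map (·.2) := by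
  intro m cs
  induction m with
  | zero => simp
  | succ m ih =>
    obtain ⟨htok, hfoun⟩ := ih
    rw [Function.iterate_succ_apply']
    set st := stepA^[m] (cs, (none : Option Nat)) with hst
    cases hdm : (tok (levs 101) cs).drop m with
    | nil =>
      have hfind : findScanA st.1 (levs 101) = none :=
        tok_none 101 st.1 (le_refl _) (by rw [htok, hdm])
      have hstep : stepA st = st := by
        simp only [stepA, levs_pyRange, hfind]
      rw [hstep]
      have hlen : (tok (levs 101) cs).length ≤ m := by
        have := List.drop_eq_nil_iff.1 hdm; omega
      constructor
      · rw [htok, hdm, List.drop_eq_nil_of_le (by omega)]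
      · rw [hfoun, List.take_of_length_le hlen, List.take_of_length_le (by omega)]
    | cons p rest =>
      obtain ⟨j, hj, hp, hfind, hset⟩ :=
        tok_step 101 st.1 (le_refl _) (by intro v _ hv; omega) p rest (by rw [htok, hdm])
      have hstep : stepA st = (st.1.set j (st.1.getD j 0 - 1), some j) := by
        simp only [stepA, levs_pyRange, hfind]
        congr 1
        simp [PySem.List.pySetD_natCast, PySem.List.pyGetD_natCast]
      rw [hstep]
      constructor
      · simp only
        rw [hset, ← List.tail_drop, hdm, List.tail_cons]
      · simp only [Option.map_some]
        rw [take_getLast?_of_drop_cons hdm, hp]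
        simp

theorem foldl_const_iterate {α β : Type} : ∀ (l : List α) (f : β → β) (st : β),
    l.foldl (fun st _ => f st) st = f^[l.length] st := by
  intro l
  induction l with
  | nil => intro f st; rfl
  | cons x xs ih =>
    intro f st
    simp only [List.foldl_cons, List.length_cons, ih, Function.iterate_succ_apply]

theorem order_eq (cs : List Int) :
    (PySem.List.pyRange 100 (-1) (-1)).flatMap (fun L =>
      (PySem.List.enumerate cs).filterMap (fun p =>
        if L ≤ p.2 ∧ p.2 ≤ 100 then some p.1 else none))
    = (tok (levs 101) cs).map (·.2) := by
  rw [levs_pyRange]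
  simp only [tok, List.map_flatMap]
  apply List.flatMap_congr   -- may not exist; fallback below
  intro L _
  simp only [lvl, lvlF, List.map_filterMap]
  apply List.filterMap_congr
  intro p _
  by_cases h : L ≤ p.2 ∧ p.2 ≤ 100 <;> simp [h]

theorem tok_ne_nil {cs : List Int} {v : Int} (hv : v ∈ cs) (h0 : 0 ≤ v) (h100 : v ≤ 100) :
    tok (levs 101) cs ≠ [] := by
  intro hnil
  have hvl : lvl cs v = [] := by
    have : ∀ L ∈ levs 101, lvl cs L = [] := by
      intro L hL
      have := List.flatMap_eq_nil_iff.1 hnil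
      exact this L hL
    exact this v (mem_levs.2 ⟨h0, by omega⟩)
  exact (lvlF_nil_iff.1 hvl) v hv ⟨le_refl v, h100⟩

-- ===== VERDICT (by name: the statement is the Claim_ definition above) =====
theorem theIndex_spec : Claim_equal_theIndex := by
  unfold Claim_equal_theIndex Spec_theIndex
  intro carrots amount _ hpre
  obtain ⟨ha, v, hv, hv0, hv100⟩ := hpre
  set T := tok (levs 101) carrots with hT
  have hTne : T ≠ [] := tok_ne_nil hv hv0 hv100
  have hTlen : 1 ≤ T.length := by
    cases hTeq : T with
    | nil => exact absurd hTeq hTne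
    | cons a b => simp
  set m : Nat := amount.toNat with hm
  have hm1 : 1 ≤ m := by omega
  -- A's side
  obtain ⟨_, hfoun⟩ := iterA_spec m carrots
  set idx : Nat := min m T.length - 1 with hidx
  have hidxlt : idx < T.length := by omega
  have hlast : (T.take m).getLast? = some T[idx] := by
    rw [List.getLast?_eq_getElem?]
    have hlen : (T.take m).length = min m T.length := by simp [List.length_take]
    rw [hlen]
    rw [List.getElem?_take]
    simp only [hidx]
    rw [if_pos (by omega)]
    exact List.getElem?_eq_getElem hidxlt
  rw [hlast] at hfoun
  have hA : theIndex carrots amount = T[idx].2 := by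
    unfold theIndex
    rw [foldl_const_iterate]
    rw [PySem.List.length_pyRange_one]
    have : (amount - 0).toNat = m := by omega
    rw [this]
    obtain ⟨f, hf, hfval⟩ := Option.map_eq_some_iff.1 hfoun
    rw [hf]
    exact hfval
  -- B's side
  have hB : theIndex_alt carrots amount = T[idx].2 := by
    unfold theIndex_alt
    simp only [order_eq carrots, ← hT]
    set k : Int := min amount ((T.map (·.2)).length : Int) with hk
    have hklen : (T.map (·.2)).length = T.length := by simp
    have hk1 : 1 ≤ k := by
      rw [hk, hklen]; omega
    have hkle : k - 1 < ((T.map (·.2)).length : Int) := by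
      rw [hklen]; rw [hk, hklen]; omega
    rw [show PySem.List.pyGet? (List.map (fun x => x.2) T) (k - 1)
          = (List.map (fun x => x.2) T)[(k - 1).toNat]? from
        PySem.List.pyGet?_of_nonneg _ (by omega)]
    have htonat : (k - 1).toNat = idx := by
      rw [hk, hklen, hidx, hm]; omega
    rw [htonat]
    rw [List.getElem?_map]
    rw [List.getElem?_eq_getElem hidxlt]
    simp
  rw [hA, hB]
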